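-- pv_equiv track=rewrite | github.com/GuacamoleResearch/ft-staging | .github/workflows/reporting.py | get_issue_summary
-- ===== SOURCE A (Python) =====
-- STATUS_HEADERS= {'':0, '1-Approved':0, '2-Scheduled':0, '3-Delivering':0, '4-Done':0, '5-Archive':0}
--
-- def get_issue_summary(issue_list, target_labels):
--     '''Build summary issue count by status (columns) and region or remote (rows)'''
--     # Initialize data structure based on target labels
--     rows = {'TBD':dict.copy(STATUS_HEADERS)}
--     for label in target_labels:
--         rows[label] = dict.copy(STATUS_HEADERS)
--
--     # Generate a per-label, per-status counts
--     for issue in issue_list: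
--         labels = issue['Labels']
--         found_row = False
--         for row_label, status_count in rows.items():
--             if str(labels).find(row_label) >= 0:
--                 status_count[issue['Status']] += 1
--                 found_row = True
--         if not found_row:
--             rows['TBD'][issue['Status']] += 1
--
--     # Convert the data structure to MD
--     # Start with the header
--     markdown = '| '
--     for status in sorted(STATUS_HEADERS):
--         row_header = status if (status!='') else 'None'
--         markdown += '| ' + row_header
--     markdown += ' |\n|-|-|-|-|-|-|-|\n'
--
--     # Add the body of the table
--     for row_label, status_count in rows.items():
--         markdown += '| ' + row_label
--         for status in status_count:
--             markdown += '| ' + str(status_count[status])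
--         markdown += ' |\n'
--
--     return markdown
-- ===== SOURCE B (Python) =====
-- STATUS_HEADERS= {'':0, '1-Approved':0, '2-Scheduled':0, '3-Delivering':0, '4-Done':0, '5-Archive':0}
--
-- def get_issue_summary(issue_list, target_labels):
--     '''Build summary issue count by status (columns) and region or remote (rows)'''
--     statuses = sorted(STATUS_HEADERS)
--     row_labels = list(dict.fromkeys(['TBD'] + list(target_labels)))
--     unmatched = [i for i in issue_list
--                  if not any(lab in str(i['Labels']) for lab in row_labels)]
--     lines = ['| ' + ''.join('| ' + (s if s != '' else 'None') for s in statuses) + ' |',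
--              '|-|-|-|-|-|-|-|']
--     for lab in row_labels:
--         hits = [i for i in issue_list if str(i['Labels']).find(lab) >= 0]
--         if lab == 'TBD':
--             hits = hits + unmatched
--         cells = ''.join('| ' + str(sum(1 for i in hits if i['Status'] == s)) for s in statuses)
--         lines.append('| ' + lab + cells + ' |')
--     return '\n'.join(lines) + '\n'
-- ===== Notes on version B (the rewrite author's own statement) =====
-- stated objective: alternative
-- what changed: A makes one pass over the issues mutating a dict of per-row status-counter dicts with a found_row flag; B instead computes each cell directly by filtering the issue list per row label (with the set of unmatched issues computed once and appended to the TBD row) and assembles the table from a list of row lines joined with newlines.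
import Mathlib
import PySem

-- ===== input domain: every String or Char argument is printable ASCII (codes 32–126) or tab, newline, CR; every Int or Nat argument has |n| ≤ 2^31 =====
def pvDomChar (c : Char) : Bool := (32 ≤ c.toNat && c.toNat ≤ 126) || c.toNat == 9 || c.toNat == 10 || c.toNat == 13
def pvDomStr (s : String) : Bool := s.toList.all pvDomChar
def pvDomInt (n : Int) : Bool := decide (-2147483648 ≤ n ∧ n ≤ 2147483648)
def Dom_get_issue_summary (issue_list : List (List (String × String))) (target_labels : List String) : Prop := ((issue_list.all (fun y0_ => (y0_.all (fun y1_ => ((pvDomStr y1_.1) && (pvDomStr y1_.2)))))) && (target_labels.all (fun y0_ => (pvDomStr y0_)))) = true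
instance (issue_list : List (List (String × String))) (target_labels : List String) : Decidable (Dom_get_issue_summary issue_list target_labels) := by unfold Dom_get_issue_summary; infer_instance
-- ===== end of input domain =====

-- B changes the aggregation: instead of one pass mutating a dict of per-row status counters
-- (with a found_row flag), it counts each cell directly by filtering the issue list per row
-- label, with the unmatched issues computed once and appended to the TBD row (objective:
-- alternative decomposition, same asymptotic cost).

-- ===== PORT A =====
-- shared module-level constant STATUS_HEADERS (a dict literal)
def STATUS_HEADERS : PySem.Dict String Int :=
  PySem.Dict.ofList [("", 0), ("1-Approved", 0), ("2-Scheduled", 0), ("3-Delivering", 0), ("4-Done", 0), ("5-Archive", 0)]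

-- issue['Labels'] / issue['Status']: dict lookup; the default is never used under Pre_
-- (Python raises KeyError exactly where Pre_ fails)
def pvLabels (issue : List (String × String)) : String := (PySem.Dict.ofList issue).getD "Labels" ""
def pvStatus (issue : List (String × String)) : String := (PySem.Dict.ofList issue).getD "Status" ""

def get_issue_summary (issue_list : List (List (String × String))) (target_labels : List String) : String :=
  -- rows = {'TBD': copy}; for label in target_labels: rows[label] = copy
  let rows0 : PySem.Dict String (PySem.Dict String Int) :=
    target_labels.foldl (fun r label => r.insert label STATUS_HEADERS)
      (PySem.Dict.empty.insert "TBD" STATUS_HEADERS)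
  -- per-issue loop; the inner 'for row_label, status_count in rows.items()' only reads the
  -- row label and mutates that row's counter in place, so it is the fold over rows.keys
  let rows : PySem.Dict String (PySem.Dict String Int) :=
    issue_list.foldl (fun rows issue =>
      let labels := pvLabels issue
      let found := rows.keys.foldl (fun (acc : PySem.Dict String (PySem.Dict String Int) × Bool) row_label =>
          if 0 ≤ PySem.Str.find labels row_label then
            (acc.1.modify row_label STATUS_HEADERS (fun sc => sc.modify (pvStatus issue) 0 (· + 1)), true)
          else acc) (rows, false)
      if found.2 then found.1
      else found.1.modify "TBD" STATUS_HEADERS (fun sc => sc.modify (pvStatus issue) 0 (· + 1))) rows0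
  -- header
  let md0 := (PySem.List.sorted STATUS_HEADERS.keys (fun x => x) false).foldl
      (fun md status => md ++ ("| " ++ (if status ≠ "" then status else "None"))) "| "
  let md1 := md0 ++ " |\n|-|-|-|-|-|-|-|\n"
  -- body
  rows.items.foldl (fun md p =>
    let md := md ++ ("| " ++ p.1)
    let md := p.2.keys.foldl (fun md status => md ++ ("| " ++ PySem.Int.toStr (p.2.getD status 0))) md
    md ++ " |\n") md1

-- ===== PORT B =====
def get_issue_summary_alt (issue_list : List (List (String × String))) (target_labels : List String) : String :=
  let statuses := PySem.List.sorted STATUS_HEADERS.keys (fun x => x) false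
  let row_labels := PySem.List.dedup ("TBD" :: target_labels)
  let unmatched := issue_list.filter (fun i => ! row_labels.any (fun lab => PySem.Str.isIn lab (pvLabels i)))
  let header := "| " ++ (statuses.foldl (fun acc s => acc ++ ("| " ++ (if s ≠ "" then s else "None"))) "") ++ " |"
  let lines := header :: "|-|-|-|-|-|-|-|" :: row_labels.map (fun lab =>
    let hits := issue_list.filter (fun i => PySem.Str.isIn lab (pvLabels i))
    let hits := if lab = "TBD" then hits ++ unmatched else hits
    let cells := statuses.foldl (fun acc s =>
        acc ++ ("| " ++ PySem.Int.toStr (hits.countP (fun i => pvStatus i == s) : Int))) ""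
    "| " ++ lab ++ cells ++ " |")
  PySem.Str.join "\n" lines ++ "\n"

-- ===== PRECONDITION & SPEC =====
-- Pre_ excludes exactly the inputs where A raises KeyError: an issue missing the 'Labels'
-- or 'Status' key, or whose 'Status' is not one of the STATUS_HEADERS columns.
def Pre_get_issue_summary (issue_list : List (List (String × String))) (target_labels : List String) : Prop :=
  ∀ issue ∈ issue_list,
    (PySem.Dict.ofList issue).contains "Labels" = true ∧
    (PySem.Dict.ofList issue).contains "Status" = true ∧
    (PySem.Dict.ofList issue).getD "Status" "" ∈ STATUS_HEADERS.keys

instance (issue_list : List (List (String × String))) (target_labels : List String) : Decidable (Pre_get_issue_summary issue_list target_labels) := by unfold Pre_get_issue_summary; infer_instance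

def pvWitness_get_issue_summary : (List (List (String × String))) × List String :=
  ([[("Labels", "reg-TBD x"), ("Status", "1-Approved")], [("Labels", "zzz"), ("Status", "")]], ["reg-1", "zzz"])

def Spec_get_issue_summary (issue_list : List (List (String × String))) (target_labels : List String) (out : String) : Prop := out = get_issue_summary_alt issue_list target_labels

instance (issue_list : List (List (String × String))) (target_labels : List String) (out : String) : Decidable (Spec_get_issue_summary issue_list target_labels out) := by unfold Spec_get_issue_summary; infer_instance

-- ===== CLAIM =====
def Claim_equal_get_issue_summary : Prop := ∀ (issue_list : List (List (String × String))) (target_labels : List String), Dom_get_issue_summary issue_list target_labels → Pre_get_issue_summary issue_list target_labels → Spec_get_issue_summary issue_list target_labels (get_issue_summary issue_list target_labels)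

-- ===== LEMMAS AND PROOFS =====

-- abbreviations used only by the proofs
def pvHK : List String := ["", "1-Approved", "2-Scheduled", "3-Delivering", "4-Done", "5-Archive"]

def pvR (target_labels : List String) : List String := PySem.List.dedup ("TBD" :: target_labels)

-- B's per-cell count: issues whose label string contains L (plus, for the TBD row, the
-- issues matching no row label), with Status = S
def pvCnt (target_labels : List String) (l : List (List (String × String))) (L S : String) : Int :=
  ((l.countP (fun i => (pvStatus i == S) && PySem.Str.isIn L (pvLabels i)) : Nat) : Int)
  + (if L = "TBD" then ((l.countP (fun i => (pvStatus i == S) && !(pvR target_labels).any (fun lab => PySem.Str.isIn lab (pvLabels i))) : Nat) : Int) else 0)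

theorem pv_match_iff (s L : String) : (0 ≤ PySem.Str.find s L) ↔ PySem.Str.isIn L s = true := by
  rw [PySem.Str.find_nonneg_iff, PySem.Str.isIn_iff_infix]

theorem pv_hk_pairwise : pvHK.Pairwise (fun a b => a ≤ b) := by
  apply List.IsChain.pairwise
  unfold pvHK
  repeat (first | exact le_of_lt (compare_lt_iff_lt.mp rfl) | constructor)

theorem pv_keys_eq : STATUS_HEADERS.keys = pvHK := by decide

theorem pv_sorted_eq : PySem.List.sorted STATUS_HEADERS.keys (fun x => x) false = pvHK := by
  rw [pv_keys_eq]; exact PySem.List.sorted_eq_self_of_pairwise pvHK (fun x => x) pv_hk_pairwise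

-- rows0: every row starts as a copy of STATUS_HEADERS
theorem pv_rows0_getD (tl : List String) (d : PySem.Dict String (PySem.Dict String Int)) (L : String) (dflt : PySem.Dict String Int) :
    (tl.foldl (fun r label => r.insert label STATUS_HEADERS) d).getD L dflt =
      if L ∈ tl then STATUS_HEADERS else d.getD L dflt := by
  induction tl generalizing d with
  | nil => simp
  | cons x tl ih =>
    simp only [List.foldl_cons, ih, List.mem_cons, PySem.Dict.getD_insert]
    by_cases hx : L = x <;> by_cases hm : L ∈ tl <;> simp [hx, hm]

-- the inner 'for row_label, status_count in rows.items()' fold, characterised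
def pvStep (labels st : String) : (PySem.Dict String (PySem.Dict String Int) × Bool) → String → (PySem.Dict String (PySem.Dict String Int) × Bool) :=
  fun acc row_label =>
    if 0 ≤ PySem.Str.find labels row_label then
      (acc.1.modify row_label STATUS_HEADERS (fun sc => sc.modify st 0 (· + 1)), true)
    else acc

theorem pvStep_pos (labels st : String) (acc : PySem.Dict String (PySem.Dict String Int) × Bool) (x : String)
    (hx : 0 ≤ PySem.Str.find labels x) :
    pvStep labels st acc x = (acc.1.modify x STATUS_HEADERS (fun sc => sc.modify st 0 (· + 1)), true) := by
  simp only [pvStep]; exact if_pos hx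

theorem pvStep_neg (labels st : String) (acc : PySem.Dict String (PySem.Dict String Int) × Bool) (x : String)
    (hx : ¬ 0 ≤ PySem.Str.find labels x) :
    pvStep labels st acc x = acc := by
  simp only [pvStep]; exact if_neg hx

theorem pv_inner_snd (labels st : String) (ks : List String) (rows : PySem.Dict String (PySem.Dict String Int)) (b0 : Bool) :
    (ks.foldl (pvStep labels st) (rows, b0)).2 = (b0 || ks.any (fun rl => decide (0 ≤ PySem.Str.find labels rl))) := by
  induction ks generalizing rows b0 with
  | nil => simp
  | cons x ks ih =>
    rw [List.foldl_cons, List.any_cons]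
    by_cases hx : 0 ≤ PySem.Str.find labels x
    · rw [pvStep_pos labels st (rows, b0) x hx, ih, decide_eq_true hx]
      simp
    · rw [pvStep_neg labels st (rows, b0) x hx, ih, decide_eq_false hx]
      simp

theorem pv_inner_keys (labels st : String) (ks : List String) (rows : PySem.Dict String (PySem.Dict String Int)) (b0 : Bool)
    (h : ∀ k ∈ ks, k ∈ rows.keys) :
    (ks.foldl (pvStep labels st) (rows, b0)).1.keys = rows.keys := by
  induction ks generalizing rows b0 with
  | nil => simp
  | cons x ks ih =>
    rw [List.foldl_cons]
    by_cases hx : 0 ≤ PySem.Str.find labels x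
    · rw [pvStep_pos labels st (rows, b0) x hx]
      have hkeys : (rows.modify x STATUS_HEADERS (fun sc => sc.modify st 0 (· + 1))).keys = rows.keys := by
        rw [PySem.Dict.keys_modify, PySem.Dict.keys_insert_of_contains]
        rw [PySem.Dict.contains_iff_mem_keys]
        exact h x (List.mem_cons_self)
      rw [ih _ _ (by intro k hk; rw [hkeys]; exact h k (List.mem_cons_of_mem _ hk))]
      exact hkeys
    · rw [pvStep_neg labels st (rows, b0) x hx]
      exact ih _ _ (fun k hk => h k (List.mem_cons_of_mem _ hk))

theorem pv_inner_getD (labels st : String) (ks : List String) (hnd : ks.Nodup) (rows : PySem.Dict String (PySem.Dict String Int)) (b0 : Bool) (L : String) :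
    (ks.foldl (pvStep labels st) (rows, b0)).1.getD L STATUS_HEADERS =
      if L ∈ ks ∧ 0 ≤ PySem.Str.find labels L then
        (rows.getD L STATUS_HEADERS).modify st 0 (· + 1)
      else rows.getD L STATUS_HEADERS := by
  induction ks generalizing rows b0 with
  | nil => simp
  | cons x ks ih =>
    have hnd' := (List.nodup_cons.mp hnd).2
    have hxk := (List.nodup_cons.mp hnd).1
    rw [List.foldl_cons]
    by_cases hx : 0 ≤ PySem.Str.find labels x
    · rw [pvStep_pos labels st (rows, b0) x hx, ih hnd']
      by_cases hL : L ∈ ks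
      · have hLx : L ≠ x := fun h => hxk (h ▸ hL)
        by_cases hm : 0 ≤ PySem.Str.find labels L
        · rw [if_pos ⟨hL, hm⟩, if_pos ⟨List.mem_cons_of_mem _ hL, hm⟩,
              PySem.Dict.getD_modify, if_neg hLx]
        · rw [if_neg (fun hc => hm hc.2), if_neg (fun hc => hm hc.2),
              PySem.Dict.getD_modify, if_neg hLx]
      · by_cases hLx : L = x
        · subst hLx
          rw [if_neg (fun hc => hL hc.1), if_pos ⟨List.mem_cons_self, hx⟩,
              PySem.Dict.getD_modify, if_pos rfl]
        · rw [if_neg (fun hc => hL hc.1),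
              if_neg (fun hc => hL (((List.mem_cons.mp hc.1).resolve_left hLx))),
              PySem.Dict.getD_modify, if_neg hLx]
    · rw [pvStep_neg labels st (rows, b0) x hx, ih hnd']
      by_cases hL : L ∈ ks
      · by_cases hm : 0 ≤ PySem.Str.find labels L
        · rw [if_pos ⟨hL, hm⟩, if_pos ⟨List.mem_cons_of_mem _ hL, hm⟩]
        · rw [if_neg (fun hc => hm hc.2), if_neg (fun hc => hm hc.2)]
      · by_cases hLx : L = x
        · subst hLx
          rw [if_neg (fun hc => hL hc.1), if_neg (fun hc => hx hc.2)]
        · rw [if_neg (fun hc => hL hc.1),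
              if_neg (fun hc => hL ((List.mem_cons.mp hc.1).resolve_left hLx))]

-- A's whole aggregation loop, characterised: keys are the dedup'd row labels and every cell
-- holds B's count
def pvStepIssue : PySem.Dict String (PySem.Dict String Int) → List (String × String) → PySem.Dict String (PySem.Dict String Int) :=
  fun rows issue =>
    let labels := pvLabels issue
    let found := rows.keys.foldl (pvStep labels (pvStatus issue)) (rows, false)
    if found.2 then found.1
    else found.1.modify "TBD" STATUS_HEADERS (fun sc => sc.modify (pvStatus issue) 0 (· + 1))

def pvInv (tl : List String) (l : List (List (String × String))) (rows : PySem.Dict String (PySem.Dict String Int)) : Prop :=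
  rows.keys = pvR tl ∧
  ∀ L ∈ pvR tl, (rows.getD L STATUS_HEADERS).keys = pvHK ∧
    ∀ S ∈ pvHK, (rows.getD L STATUS_HEADERS).getD S 0 = pvCnt tl l L S



-- helper facts
theorem pv_R_nodup (tl : List String) : (pvR tl).Nodup := by
  rw [pvR, PySem.List.dedup_eq_ofList]; exact PySem.Set.nodup_ofList _
theorem pv_TBD_mem (tl : List String) : "TBD" ∈ pvR tl := by
  rw [pvR, PySem.List.dedup_eq_ofList]
  exact (PySem.Set.mem_ofList _ _).mpr List.mem_cons_self
theorem pv_R_eq_update (tl : List String) : pvR tl = PySem.Set.update ["TBD"] tl := rfl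
theorem pv_SH_getD : ∀ S ∈ pvHK, STATUS_HEADERS.getD S 0 = 0 := by decide

theorem pv_rows0_inv (tl : List String) :
    pvInv tl [] (tl.foldl (fun r label => r.insert label STATUS_HEADERS) (PySem.Dict.empty.insert "TBD" STATUS_HEADERS)) := by
  constructor
  · rw [PySem.Dict.keys_foldl_insert (f := fun _ _ => STATUS_HEADERS), pv_R_eq_update]
    rfl
  · intro L hL
    rw [pv_rows0_getD]
    have hv : (if L ∈ tl then STATUS_HEADERS else (PySem.Dict.empty.insert "TBD" STATUS_HEADERS).getD L STATUS_HEADERS) = STATUS_HEADERS := by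
      by_cases h : L ∈ tl
      · rw [if_pos h]
      · rw [if_neg h, PySem.Dict.getD_insert]
        by_cases h2 : L = "TBD"
        · rw [if_pos h2]
        · rw [if_neg h2]; rfl
    rw [hv]
    refine ⟨by decide, ?_⟩
    intro S hS
    rw [pv_SH_getD S hS]
    simp [pvCnt]

theorem pv_match_bool (s L : String) : decide (0 ≤ PySem.Str.find s L) = PySem.Str.isIn L s := by
  cases hb : PySem.Str.isIn L s
  · exact decide_eq_false (fun hc => by rw [(pv_match_iff s L).mp hc] at hb; exact Bool.noConfusion hb)
  · exact decide_eq_true ((pv_match_iff s L).mpr hb)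

theorem pv_any_bridge (tl : List String) (s : String) :
    (pvR tl).any (fun rl => decide (0 ≤ PySem.Str.find s rl)) = (pvR tl).any (fun lab => PySem.Str.isIn lab s) := by
  apply PySem.List.any_congr_mem
  exact fun rl _ => pv_match_bool s rl

theorem pv_cnt_append (tl : List String) (l : List (List (String × String))) (x : List (String × String)) (L S : String) :
    pvCnt tl (l ++ [x]) L S = pvCnt tl l L S
      + (if (pvStatus x == S) && PySem.Str.isIn L (pvLabels x) then 1 else 0)
      + (if L = "TBD" then (if (pvStatus x == S) && !(pvR tl).any (fun lab => PySem.Str.isIn lab (pvLabels x)) then 1 else 0) else 0) := by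
  unfold pvCnt
  rw [List.countP_append, List.countP_append]
  by_cases hT : L = "TBD"
  · rw [if_pos hT, if_pos hT, if_pos hT]
    push_cast
    simp only [List.countP_cons, List.countP_nil]
    split_ifs <;> push_cast <;> ring
  · rw [if_neg hT, if_neg hT, if_neg hT]
    push_cast
    simp only [List.countP_cons, List.countP_nil]
    split_ifs <;> push_cast <;> ring

theorem pv_isIn_false (s L : String) (hm : ¬ 0 ≤ PySem.Str.find s L) : PySem.Str.isIn L s = false := by
  cases hb : PySem.Str.isIn L s
  · rfl
  · exact absurd ((pv_match_iff _ _).mpr hb) hm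

theorem pv_beq_false {a b : String} (h : ¬ b = a) : (a == b) = false :=
  beq_eq_false_iff_ne.mpr (fun hc => h hc.symm)

theorem pv_step_inv (tl : List String) (l : List (List (String × String))) (x : List (String × String))
    (rows : PySem.Dict String (PySem.Dict String Int))
    (hst : pvStatus x ∈ pvHK) (h : pvInv tl l rows) :
    pvInv tl (l ++ [x]) (pvStepIssue rows x) := by
  obtain ⟨hkeys, hval⟩ := h
  have hnd : rows.keys.Nodup := by rw [hkeys]; exact pv_R_nodup tl
  have hsnd := pv_inner_snd (pvLabels x) (pvStatus x) rows.keys rows false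
  have hk := pv_inner_keys (pvLabels x) (pvStatus x) rows.keys rows false (fun k hk => hk)
  have hg := fun L => pv_inner_getD (pvLabels x) (pvStatus x) rows.keys hnd rows false L
  rw [Bool.false_or] at hsnd
  unfold pvStepIssue
  simp only []
  set F := rows.keys.foldl (pvStep (pvLabels x) (pvStatus x)) (rows, false) with hF
  by_cases hfound : F.2 = true
  · rw [if_pos hfound]
    refine ⟨by rw [hk, hkeys], ?_⟩
    intro L hL
    have hLk : L ∈ rows.keys := by rw [hkeys]; exact hL
    have hany : (pvR tl).any (fun lab => PySem.Str.isIn lab (pvLabels x)) = true := by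
      rw [← pv_any_bridge, ← hkeys, ← hsnd]; exact hfound
    obtain ⟨hik, hic⟩ := hval L hL
    by_cases hm : 0 ≤ PySem.Str.find (pvLabels x) L
    · rw [hg L, if_pos ⟨hLk, hm⟩]
      have hmi : PySem.Str.isIn L (pvLabels x) = true := (pv_match_iff _ _).mp hm
      refine ⟨?_, ?_⟩
      · rw [PySem.Dict.keys_modify, PySem.Dict.keys_insert_of_contains, hik]
        rw [PySem.Dict.contains_iff_mem_keys, hik]; exact hst
      · intro S hS
        rw [PySem.Dict.getD_modify, pv_cnt_append]
        rw [if_neg (show ¬ ((pvStatus x == S) && !(pvR tl).any (fun lab => PySem.Str.isIn lab (pvLabels x))) = true by rw [hany]; simp)]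
        by_cases hSe : S = pvStatus x
        · rw [if_pos hSe, ← hSe, hic S hS]
          rw [if_pos (show ((S == S) && PySem.Str.isIn L (pvLabels x)) = true by rw [hmi]; simp)]
          simp
        · rw [if_neg hSe, hic S hS]
          rw [if_neg (show ¬ ((pvStatus x == S) && PySem.Str.isIn L (pvLabels x)) = true by rw [hmi, pv_beq_false hSe]; simp)]
          omega
    · rw [hg L, if_neg (fun hc => hm hc.2)]
      refine ⟨hik, ?_⟩
      intro S hS
      rw [hic S hS, pv_cnt_append]
      have hmi := pv_isIn_false (pvLabels x) L hm
      rw [if_neg (show ¬ ((pvStatus x == S) && PySem.Str.isIn L (pvLabels x)) = true by rw [hmi]; simp)]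
      rw [if_neg (show ¬ ((pvStatus x == S) && !(pvR tl).any (fun lab => PySem.Str.isIn lab (pvLabels x))) = true by rw [hany]; simp)]
      simp
  · rw [if_neg hfound]
    have hanyd : rows.keys.any (fun rl => decide (0 ≤ PySem.Str.find (pvLabels x) rl)) = false := by
      rw [← hsnd]; revert hfound; cases F.2 <;> simp
    have hany : (pvR tl).any (fun lab => PySem.Str.isIn lab (pvLabels x)) = false := by
      rw [← pv_any_bridge, ← hkeys]; exact hanyd
    have hnomatch : ∀ L ∈ rows.keys, ¬ 0 ≤ PySem.Str.find (pvLabels x) L := by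
      intro L hL hc
      have h2 := List.any_eq_false.mp hanyd L hL
      rw [decide_eq_true hc] at h2
      exact absurd h2 (by simp)
    have hTBDk : "TBD" ∈ rows.keys := by rw [hkeys]; exact pv_TBD_mem tl
    constructor
    · rw [PySem.Dict.keys_modify, PySem.Dict.keys_insert_of_contains, hk, hkeys]
      rw [PySem.Dict.contains_iff_mem_keys, hk]; exact hTBDk
    · intro L hL
      have hLk : L ∈ rows.keys := by rw [hkeys]; exact hL
      obtain ⟨hik, hic⟩ := hval L hL
      have hFg : F.1.getD L STATUS_HEADERS = rows.getD L STATUS_HEADERS := by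
        rw [hg L, if_neg (fun hc => hnomatch L hLk hc.2)]
      have hmi := pv_isIn_false (pvLabels x) L (hnomatch L hLk)
      by_cases hT : L = "TBD"
      · subst hT
        rw [PySem.Dict.getD_modify, if_pos rfl, hFg]
        refine ⟨?_, ?_⟩
        · rw [PySem.Dict.keys_modify, PySem.Dict.keys_insert_of_contains, hik]
          rw [PySem.Dict.contains_iff_mem_keys, hik]; exact hst
        · intro S hS
          rw [PySem.Dict.getD_modify, pv_cnt_append]
          rw [if_neg (show ¬ ((pvStatus x == S) && PySem.Str.isIn "TBD" (pvLabels x)) = true by rw [hmi]; simp)]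
          rw [if_pos (rfl : "TBD" = "TBD")]
          by_cases hSe : S = pvStatus x
          · rw [if_pos hSe, ← hSe, hic S hS]
            rw [if_pos (show ((S == S) && !(pvR tl).any (fun lab => PySem.Str.isIn lab (pvLabels x))) = true by rw [hany]; simp)]
            simp
          · rw [if_neg hSe, hic S hS]
            rw [if_neg (show ¬ ((pvStatus x == S) && !(pvR tl).any (fun lab => PySem.Str.isIn lab (pvLabels x))) = true by rw [pv_beq_false hSe]; simp)]
            omega
      · rw [PySem.Dict.getD_modify, if_neg hT, hFg]
        refine ⟨hik, ?_⟩
        intro S hS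
        rw [hic S hS, pv_cnt_append]
        rw [if_neg (show ¬ ((pvStatus x == S) && PySem.Str.isIn L (pvLabels x)) = true by rw [hmi]; simp)]
        rw [if_neg hT]
        simp

theorem pv_loop_char (tl : List String) (l : List (List (String × String)))
    (hpre : ∀ i ∈ l, pvStatus i ∈ pvHK) :
    pvInv tl l (l.foldl pvStepIssue
      (tl.foldl (fun r label => r.insert label STATUS_HEADERS) (PySem.Dict.empty.insert "TBD" STATUS_HEADERS))) := by
  induction l using List.reverseRecOn with
  | nil => exact pv_rows0_inv tl
  | append_singleton l x ih =>
    rw [List.foldl_append, List.foldl_cons, List.foldl_nil]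
    exact pv_step_inv tl l x _ (hpre x (by simp)) (ih (fun i hi => hpre i (by simp [hi])))

-- string-building helpers
def pvConcat (l : List String) : String := l.foldr (· ++ ·) ""

theorem pv_foldl_str (l : List α) (F : String → α → String) (f : α → String)
    (h : ∀ (md : String), ∀ x ∈ l, F md x = md ++ f x) (a : String) :
    l.foldl F a = a ++ pvConcat (l.map f) := by
  induction l generalizing a with
  | nil => simp [pvConcat]
  | cons x l ih =>
    rw [List.foldl_cons, h a x List.mem_cons_self, ih (fun md y hy => h md y (List.mem_cons_of_mem _ hy))]
    simp [pvConcat, String.append_assoc]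

theorem pv_join_cons (sep a b : String) (l : List String) :
    PySem.Str.join sep (a :: b :: l) = a ++ sep ++ PySem.Str.join sep (b :: l) := by
  rw [← String.toList_inj]
  simp [PySem.Str.join, PySem.Chars.join_cons_cons]

theorem pv_join_nl (a : String) (l : List String) :
    PySem.Str.join "\n" (a :: l) ++ "\n" = (a ++ "\n") ++ pvConcat (l.map (· ++ "\n")) := by
  induction l generalizing a with
  | nil => simp [pvConcat, PySem.Str.join]
  | cons b l ih =>
    rw [pv_join_cons, String.append_assoc, String.append_assoc, ih b]
    simp [pvConcat, String.append_assoc]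


theorem pv_foldl_simple {α : Type} (l : List α) (g : α → String) (a : String) :
    l.foldl (fun acc x => acc ++ g x) a = a ++ pvConcat (l.map g) :=
  pv_foldl_str l _ g (fun _ _ _ => rfl) a

theorem pv_cnt_eq (tl : List String) (il : List (List (String × String))) (lab S : String) :
    ((if lab = "TBD" then
        (il.filter (fun i => PySem.Str.isIn lab (pvLabels i))) ++
          il.filter (fun i => !(pvR tl).any (fun l2 => PySem.Str.isIn l2 (pvLabels i)))
      else il.filter (fun i => PySem.Str.isIn lab (pvLabels i))).countP (fun i => pvStatus i == S) : Int)
      = pvCnt tl il lab S := by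
  by_cases hT : lab = "TBD"
  · rw [if_pos hT, hT]
    simp [pvCnt, List.countP_append, List.countP_filter]
  · rw [if_neg hT]
    simp [pvCnt, hT, List.countP_filter]

-- ===== VERDICT =====
theorem get_issue_summary_spec : Claim_equal_get_issue_summary := by
  unfold Claim_equal_get_issue_summary
  intro il tl hdom hpre
  unfold Spec_get_issue_summary
  have hst : ∀ i ∈ il, pvStatus i ∈ pvHK := by
    intro i hi
    have h2 := (hpre i hi).2.2
    rwa [pv_keys_eq] at h2
  have inv := pv_loop_char tl il hst
  have hA : get_issue_summary il tl =
      ((il.foldl pvStepIssue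
          (tl.foldl (fun r label => r.insert label STATUS_HEADERS)
            (PySem.Dict.empty.insert "TBD" STATUS_HEADERS))).items.foldl
        (fun md p =>
          (p.2.keys.foldl (fun md status => md ++ ("| " ++ PySem.Int.toStr (p.2.getD status 0)))
            (md ++ ("| " ++ p.1))) ++ " |\n")
        (((PySem.List.sorted STATUS_HEADERS.keys (fun x => x) false).foldl
            (fun md status => md ++ ("| " ++ (if status ≠ "" then status else "None"))) "| ")
          ++ " |\n|-|-|-|-|-|-|-|\n")) := rfl
  rw [hA]
  obtain ⟨hkeys, hval⟩ := inv
  set rows := il.foldl pvStepIssue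
      (tl.foldl (fun r label => r.insert label STATUS_HEADERS)
        (PySem.Dict.empty.insert "TBD" STATUS_HEADERS)) with hrows
  rw [PySem.Dict.items_eq_map_keys rows (by rw [hkeys]; exact pv_R_nodup tl) STATUS_HEADERS, hkeys]
  rw [List.foldl_map, pv_sorted_eq]
  rw [pv_foldl_str pvHK _ (fun s => "| " ++ (if s ≠ "" then s else "None")) (fun md x _ => rfl) "| "]
  rw [pv_foldl_str (pvR tl) _
      (fun k => ("| " ++ k) ++ (pvConcat (pvHK.map (fun S => "| " ++ PySem.Int.toStr (pvCnt tl il k S))) ++ " |\n"))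
      ?houter]
  case houter =>
    intro md k hk
    obtain ⟨hik, hic⟩ := hval k hk
    simp only []
    rw [hik]
    rw [pv_foldl_str pvHK _ (fun S => "| " ++ PySem.Int.toStr ((rows.getD k STATUS_HEADERS).getD S 0)) (fun md x _ => rfl)]
    rw [List.map_congr_left (fun S hS => by simp only [hic S hS] :
      ∀ S ∈ pvHK, (fun S => "| " ++ PySem.Int.toStr ((rows.getD k STATUS_HEADERS).getD S 0)) S
        = (fun S => "| " ++ PySem.Int.toStr (pvCnt tl il k S)) S)]
    simp [String.append_assoc]
  -- B side
  have hB : get_issue_summary_alt il tl =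
      PySem.Str.join "\n"
        (("| " ++ ((PySem.List.sorted STATUS_HEADERS.keys (fun x => x) false).foldl
            (fun acc s => acc ++ ("| " ++ (if s ≠ "" then s else "None"))) "") ++ " |")
          :: "|-|-|-|-|-|-|-|"
          :: (pvR tl).map (fun lab =>
            "| " ++ lab ++
              ((PySem.List.sorted STATUS_HEADERS.keys (fun x => x) false).foldl
                (fun acc s => acc ++ ("| " ++ PySem.Int.toStr
                  (((if lab = "TBD" then
                      (il.filter (fun i => PySem.Str.isIn lab (pvLabels i))) ++
                        il.filter (fun i => !(pvR tl).any (fun l2 => PySem.Str.isIn l2 (pvLabels i)))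
                    else il.filter (fun i => PySem.Str.isIn lab (pvLabels i))).countP
                      (fun i => pvStatus i == s) : Int)))) "")
              ++ " |")) ++ "\n" := rfl
  rw [hB, pv_sorted_eq]
  rw [pv_join_nl]
  simp only [pv_foldl_simple, pv_cnt_eq, List.map_cons, List.map_map]
  have hlit : (" |\n|-|-|-|-|-|-|-|\n" : String) = " |" ++ ("\n" ++ ("|-|-|-|-|-|-|-|" ++ "\n")) := by decide
  rw [hlit]
  rw [List.map_congr_left (fun k _ => by simp only [Function.comp, String.append_assoc, String.empty_append] :
    ∀ k ∈ pvR tl, ((fun x => x ++ "\n") ∘ (fun lab =>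
        "| " ++ lab ++ ("" ++ pvConcat (pvHK.map (fun s => "| " ++ PySem.Int.toStr (pvCnt tl il lab s)))) ++ " |")) k
      = (fun k => ("| " ++ k) ++ (pvConcat (pvHK.map (fun S => "| " ++ PySem.Int.toStr (pvCnt tl il k S))) ++ (" |" ++ "\n")))  k)]
  simp [pvConcat, String.append_assoc, String.empty_append]
  rw [show (" |\n|-|-|-|-|-|-|-|\n" : String) = " |\n" ++ "|-|-|-|-|-|-|-|\n" by decide,
     String.append_assoc]
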